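-- pv_equiv track=rewrite | github.com/rmthorpe/wheel | puzzle.py | parse
-- ===== SOURCE A (Python) =====
-- def parse(string):
--     d = dict()
--     pos = dict()
--     total = 0
--     i = 0
--     for char in string:
--         char = char.lower()
--         check = d.get(char)
--         if check is None:
--             if char.isalpha():
--                 total += 1
--                 d[char] = 1
--                 pos[char] = [i]
--         else:
--             if char.isalpha():
--                 total += 1
--                 d[char] += 1
--                 pos[char].append(i)
--         i += 1
--     return (d, pos, total)
-- ===== SOURCE B (Python) =====
-- def parse(string):
--     low = [c.lower() for c in string]
--     seen = []
--     for c in low: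
--         if c.isalpha() and c not in seen:
--             seen.append(c)
--     pos = {c: [i for i, x in enumerate(low) if x == c] for c in seen}
--     d = {c: low.count(c) for c in seen}
--     total = sum(d.values())
--     return (d, pos, total)
-- ===== Notes on version B (the rewrite author's own statement) =====
-- stated objective: alternative
-- what changed: B replaces A's single pass that maintains three parallel states (count dict, position dict, total) with a staged algorithm: lowercase the string once, collect the distinct letters in first-occurrence order with a seen list, then build the positions and counts by per-letter scans (a filter over enumerate and low.count(c) for each distinct letter) and total as the sum of the counts.
import Mathlib
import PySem

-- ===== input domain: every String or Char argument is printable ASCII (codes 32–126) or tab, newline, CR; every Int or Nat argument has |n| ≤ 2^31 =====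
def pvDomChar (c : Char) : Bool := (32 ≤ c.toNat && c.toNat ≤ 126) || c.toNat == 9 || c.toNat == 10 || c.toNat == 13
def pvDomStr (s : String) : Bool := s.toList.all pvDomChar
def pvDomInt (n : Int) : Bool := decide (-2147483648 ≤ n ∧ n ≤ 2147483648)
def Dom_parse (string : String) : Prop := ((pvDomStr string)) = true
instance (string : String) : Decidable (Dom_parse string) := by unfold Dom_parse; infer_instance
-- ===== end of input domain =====

-- B is a staged algorithm: lowercase once, collect the distinct letters in
-- first-occurrence order, then build positions/counts by per-letter scans of the
-- string (objective: alternative — nested scans instead of A's one-pass triple state).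

-- ===== PORT A =====
-- state: (d, pos, total, i), exactly A's four variables
def parseStepA (st : PySem.Dict String Int × PySem.Dict String (List Int) × Int × Int)
    (ch : Char) : PySem.Dict String Int × PySem.Dict String (List Int) × Int × Int :=
  let d := st.1
  let pos := st.2.1
  let total := st.2.2.1
  let i := st.2.2.2
  let c := PySem.Chars.lowerChar ch          -- char = char.lower()
  let key := String.ofList [c]
  match d.get? key with                      -- check = d.get(char)
  | none =>
      if PySem.Chars.isalpha c then
        (d.insert key 1, pos.insert key [i], total + 1, i + 1)
      else (d, pos, total, i + 1)
  | some v =>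
      if PySem.Chars.isalpha c then
        (d.insert key (v + 1), pos.modify key [] (· ++ [i]), total + 1, i + 1)
      else (d, pos, total, i + 1)

def parse (string : String) : (List (String × Int)) × (List (String × List Int)) × Int :=
  let r := string.toList.foldl parseStepA (PySem.Dict.empty, PySem.Dict.empty, 0, 0)
  (r.1.items, r.2.1.items, r.2.2.1)

-- ===== PORT B =====
-- seen-accumulating loop: 'if c.isalpha() and c not in seen: seen.append(c)'
def seenStep (acc : List Char) (c : Char) : List Char :=
  if PySem.Chars.isalpha c && !acc.contains c then acc ++ [c] else acc

def parse_alt (string : String) : (List (String × Int)) × (List (String × List Int)) × Int :=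
  let low := string.toList.map PySem.Chars.lowerChar     -- low = [c.lower() for c in string]
  let seen := low.foldl seenStep []
  -- pos = {c: [i for i, x in enumerate(low) if x == c] for c in seen}
  let pos := PySem.Dict.mk (seen.map (fun c =>
    (String.ofList [c], ((PySem.List.enumerate low 0).filter (fun p => p.2 == c)).map (·.1))))
  -- d = {c: low.count(c) for c in seen}
  let d := PySem.Dict.mk (seen.map (fun c => (String.ofList [c], (PySem.List.count low c : Int))))
  (d.items, pos.items, d.values.sum)                     -- total = sum(d.values())

-- ===== PRECONDITION & SPEC =====
def Spec_parse (string : String) (out : (List (String × Int)) × (List (String × List Int)) × Int) : Prop := out = parse_alt string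
instance (string : String) (out : (List (String × Int)) × (List (String × List Int)) × Int) : Decidable (Spec_parse string out) := by unfold Spec_parse; infer_instance

-- ===== CLAIM (what is proved, stated in full; the proofs are below) =====
def Claim_equal_parse : Prop := ∀ (string : String), Dom_parse string → Spec_parse string (parse string)

-- ===== LEMMAS AND PROOFS =====

-- proof-internal single-pass positions loop used to factor A's state
def pvStep (pos : PySem.Dict String (List Int)) (p : Int × Char) :
    PySem.Dict String (List Int) :=
  let c := PySem.Chars.lowerChar p.2
  if PySem.Chars.isalpha c then
    pos.modify (String.ofList [c]) [] (· ++ [p.1])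
  else pos

-- the count entry derived from a positions entry, and the derived total
def pvLen (q : String × List Int) : String × Int := (q.1, (q.2.length : Int))
def pvSumLen (l : List (String × List Int)) : Int := (l.map (fun q => (q.2.length : Int))).sum

theorem get?_mk_mapLen (l : List (String × List Int)) (k : String) :
    (PySem.Dict.mk (l.map pvLen)).get? k
      = ((PySem.Dict.mk l).get? k).map (fun v => (v.length : Int)) := by
  induction l with
  | nil => rfl
  | cons p rest ih =>
      obtain ⟨a, b⟩ := p
      simp only [List.map_cons, pvLen, PySem.Dict.get?_mk_cons]
      split <;> simp [ih]

theorem pvSumLen_cons (q : String × List Int) (l : List (String × List Int)) :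
    pvSumLen (q :: l) = (q.2.length : Int) + pvSumLen l := by
  simp [pvSumLen]

theorem sumLen_replace (l : List (String × List Int)) (key : String) (vs : List Int) (i : Int)
    (hnd : (l.map Prod.fst).Nodup) (hm : (key, vs) ∈ l) :
    pvSumLen (l.map (fun p => if p.1 == key then (key, vs ++ [i]) else p))
      = pvSumLen l + 1 := by
  induction l with
  | nil => simp at hm
  | cons p rest ih =>
      simp only [List.map_cons, List.nodup_cons] at hnd
      by_cases hk : p.1 = key
      · have hnotin : key ∉ rest.map Prod.fst := hk ▸ hnd.1
        have hp : p = (key, vs) := by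
          rcases List.mem_cons.mp hm with h | h
          · exact h.symm
          · exact absurd (List.mem_map.mpr ⟨(key, vs), h, rfl⟩) hnotin
        have htail : rest.map (fun p => if p.1 == key then (key, vs ++ [i]) else p) = rest := by
          apply List.map_congr_left ?_ |>.trans (List.map_id rest)
          intro q hq
          have : q.1 ≠ key := fun h => hnotin (List.mem_map.mpr ⟨q, hq, h⟩)
          simp [this]
        subst hp
        rw [List.map_cons, htail, if_pos (by simp), pvSumLen_cons, pvSumLen_cons]
        have h1 : (([i] : List Int)).length = 1 := rfl
        rw [List.length_append, h1]
        push_cast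
        ring
      · have hm' : (key, vs) ∈ rest := by
          rcases List.mem_cons.mp hm with h | h
          · exact absurd (congrArg Prod.fst h).symm hk
          · exact h
        rw [List.map_cons, if_neg (by simp [hk]), pvSumLen_cons, pvSumLen_cons, ih hnd.2 hm']
        ring

-- A's four-variable loop, factored through the pure positions loop pvStep
theorem parse_loop (cs : List Char) : ∀ (i : Int) (pos : PySem.Dict String (List Int)),
    pos.keys.Nodup →
    cs.foldl parseStepA (PySem.Dict.mk (pos.items.map pvLen), pos, pvSumLen pos.items, i)
      = (PySem.Dict.mk (((PySem.List.enumerate cs i).foldl pvStep pos).items.map pvLen),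
         (PySem.List.enumerate cs i).foldl pvStep pos,
         pvSumLen ((PySem.List.enumerate cs i).foldl pvStep pos).items,
         i + cs.length) := by
  induction cs with
  | nil => intro i pos _; simp [PySem.List.enumerate_nil]
  | cons c cs ih =>
      intro i pos hnd
      rw [PySem.List.enumerate_cons, List.foldl_cons, List.foldl_cons]
      set lc := PySem.Chars.lowerChar c with hlc
      set key := String.ofList [lc] with hkey
      by_cases ha : PySem.Chars.isalpha lc
      · cases hg : pos.get? key with
        | none =>
            have hcont : pos.contains key = false := by
              rw [PySem.Dict.contains_eq_isSome_get?, hg]; rfl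
            have hcontd : (PySem.Dict.mk (pos.items.map pvLen)).contains key = false := by
              rw [PySem.Dict.contains_eq_isSome_get?, get?_mk_mapLen, hg]; rfl
            have hstepB : pvStep pos (i, c) = pos.insert key [i] := by
              simp only [pvStep, ← hlc, ← hkey, ha, if_true]
              show pos.insert key (pos.getD key [] ++ [i]) = pos.insert key [i]
              rw [PySem.Dict.getD_of_get?_eq_none pos [] hg]; rfl
            have hstepA : parseStepA (PySem.Dict.mk (pos.items.map pvLen), pos, pvSumLen pos.items, i) c
                = (PySem.Dict.mk ((pos.insert key [i]).items.map pvLen),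
                   pos.insert key [i], pvSumLen (pos.insert key [i]).items, i + 1) := by
              simp only [parseStepA, ← hlc, ← hkey, get?_mk_mapLen, hg, Option.map_none, ha, if_true]
              rw [PySem.Dict.items_insert_of_not_contains pos _ hcont]
              refine Prod.ext ?_ (Prod.ext rfl (Prod.ext ?_ rfl))
              · apply PySem.Dict.ext
                rw [PySem.Dict.items_insert_of_not_contains _ _ hcontd]
                simp [pvLen]
              · simp [pvSumLen]
            rw [hstepA, ← hstepB, ih (i + 1) _ (by rw [hstepB]; exact PySem.Dict.nodup_keys_insert _ _ _ hnd)]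
            refine Prod.ext rfl (Prod.ext rfl (Prod.ext rfl ?_))
            simp; ring
        | some vs =>
            have hcont : pos.contains key = true := by
              rw [PySem.Dict.contains_eq_isSome_get?, hg]; rfl
            have hmem : (key, vs) ∈ pos.items := PySem.Dict.mem_items_of_get?_eq_some pos hg
            have hstepB : pvStep pos (i, c) = pos.insert key (vs ++ [i]) := by
              simp only [pvStep, ← hlc, ← hkey, ha, if_true]
              show pos.insert key (pos.getD key [] ++ [i]) = pos.insert key (vs ++ [i])
              rw [PySem.Dict.getD_of_get?_eq_some pos [] hg]
            have hstepA : parseStepA (PySem.Dict.mk (pos.items.map pvLen), pos, pvSumLen pos.items, i) c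
                = (PySem.Dict.mk ((pos.insert key (vs ++ [i])).items.map pvLen),
                   pos.insert key (vs ++ [i]), pvSumLen (pos.insert key (vs ++ [i])).items, i + 1) := by
              simp only [parseStepA, ← hlc, ← hkey, get?_mk_mapLen, hg, Option.map_some, ha, if_true]
              rw [PySem.Dict.items_insert_of_contains pos _ hcont]
              refine Prod.ext ?_ (Prod.ext ?_ (Prod.ext ?_ rfl))
              · apply PySem.Dict.ext
                have hcontd : (PySem.Dict.mk (pos.items.map pvLen)).contains key = true := by
                  rw [PySem.Dict.contains_eq_isSome_get?, get?_mk_mapLen, hg]; rfl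
                rw [PySem.Dict.items_insert_of_contains _ _ hcontd]
                simp only [List.map_map]
                apply List.map_congr_left
                intro q _
                by_cases h : q.1 = key <;> simp [pvLen, h]
              · show pos.modify key [] (· ++ [i]) = _
                show pos.insert key (pos.getD key [] ++ [i]) = _
                rw [PySem.Dict.getD_of_get?_eq_some pos [] hg]
              · rw [sumLen_replace pos.items key vs i hnd hmem]
            rw [hstepA, ← hstepB, ih (i + 1) _ (by rw [hstepB]; exact PySem.Dict.nodup_keys_insert _ _ _ hnd)]
            refine Prod.ext rfl (Prod.ext rfl (Prod.ext rfl ?_))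
            simp; ring
      · have hstepB : pvStep pos (i, c) = pos := by simp [pvStep, ← hlc, ha]
        have hstepA : parseStepA (PySem.Dict.mk (pos.items.map pvLen), pos, pvSumLen pos.items, i) c
            = (PySem.Dict.mk (pos.items.map pvLen), pos, pvSumLen pos.items, i + 1) := by
          simp only [parseStepA, ← hlc, ← hkey, ha]
          cases (PySem.Dict.mk (pos.items.map pvLen)).get? key <;> rfl
        rw [hstepA, hstepB, ih (i + 1) pos hnd]
        refine Prod.ext rfl (Prod.ext rfl (Prod.ext rfl ?_))
        simp; ring

-- membership / nodup / all-alpha facts about the seen loop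
theorem mem_foldl_seenStep (l : List Char) : ∀ (acc : List Char) (x : Char),
    x ∈ l.foldl seenStep acc ↔ x ∈ acc ∨ (PySem.Chars.isalpha x ∧ x ∈ l) := by
  induction l with
  | nil => intro acc x; simp
  | cons c l ih =>
      intro acc x
      rw [List.foldl_cons, ih]
      by_cases ha : PySem.Chars.isalpha c
      · by_cases hc : c ∈ acc
        · simp only [seenStep, ha, List.contains_eq_mem, hc, decide_true, Bool.not_true,
            Bool.and_false, Bool.false_eq_true, if_false, List.mem_cons]
          constructor
          · rintro (h | ⟨hx, hm⟩)
            · exact Or.inl h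
            · exact Or.inr ⟨hx, Or.inr hm⟩
          · rintro (h | ⟨hx, rfl | hm⟩)
            · exact Or.inl h
            · exact Or.inl hc
            · exact Or.inr ⟨hx, hm⟩
        · simp only [seenStep, ha, List.contains_eq_mem, hc, decide_false, Bool.not_false,
            Bool.and_true, if_true, List.mem_append, List.mem_cons]
          constructor
          · rintro ((h | (rfl | h0)) | ⟨hx, hm⟩)
            · exact Or.inl h
            · exact Or.inr ⟨ha, Or.inl rfl⟩
            · exact absurd h0 (List.not_mem_nil)
            · exact Or.inr ⟨hx, Or.inr hm⟩
          · rintro (h | ⟨hx, rfl | hm⟩)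
            · exact Or.inl (Or.inl h)
            · exact Or.inl (Or.inr (Or.inl rfl))
            · exact Or.inr ⟨hx, hm⟩
      · simp only [seenStep, ha, Bool.false_and, Bool.false_eq_true, if_false, List.mem_cons]
        constructor
        · rintro (h | ⟨hx, hm⟩)
          · exact Or.inl h
          · exact Or.inr ⟨hx, Or.inr hm⟩
        · rintro (h | ⟨hx, rfl | hm⟩)
          · exact Or.inl h
          · exact absurd hx ha
          · exact Or.inr ⟨hx, hm⟩

theorem nodup_foldl_seenStep (l : List Char) : ∀ (acc : List Char), acc.Nodup →
    (l.foldl seenStep acc).Nodup := by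
  induction l with
  | nil => intro acc h; exact h
  | cons c l ih =>
      intro acc hnd
      rw [List.foldl_cons]
      apply ih
      unfold seenStep
      split
      · next h =>
          have hc : c ∉ acc := by
            rcases Bool.and_eq_true .. |>.mp h with ⟨_, h2⟩
            simpa using h2
          have hdisj : List.Disjoint acc [c] := by
            intro a haa hb
            rw [List.mem_singleton] at hb
            exact hc (hb ▸ haa)
          exact hnd.append (List.nodup_singleton c) hdisj
      · exact hnd

theorem alpha_of_mem_seen (l : List Char) (x : Char) (h : x ∈ l.foldl seenStep []) :
    PySem.Chars.isalpha x = true := by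
  rcases (mem_foldl_seenStep l [] x).mp h with h | h
  · simp at h
  · exact h.1

theorem stringify_inj (a b : Char) (h : String.ofList [a] = String.ofList [b]) : a = b := by
  have := congrArg String.toList h
  simpa using this

-- length of the per-letter position scan = count
theorem filter_enumerate_length (l : List Char) (c : Char) : ∀ (s : Int),
    ((PySem.List.enumerate l s).filter (fun p => p.2 == c)).length = l.count c := by
  induction l with
  | nil => intro s; simp [PySem.List.enumerate_nil]
  | cons a l ih =>
      intro s
      rw [PySem.List.enumerate_cons, List.filter_cons]
      by_cases h : a = c
      · simp [h, ih]
      · simp [h, ih]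

theorem filter_enumerate_nil (l : List Char) (c : Char) (hc : c ∉ l) (s : Int) :
    (PySem.List.enumerate l s).filter (fun p => p.2 == c) = [] := by
  rw [List.filter_eq_nil_iff]
  intro p hp
  rcases (PySem.List.mem_enumerate_iff ..).mp hp with ⟨k, hk, rfl⟩
  simp only [beq_iff_eq]
  exact fun h => hc (h ▸ l.getElem_mem hk)

-- the characterization of the single-pass positions dict as B's nested scans
theorem posItems (cs : List Char) :
    ((PySem.List.enumerate cs 0).foldl pvStep PySem.Dict.empty).items
      = ((cs.map PySem.Chars.lowerChar).foldl seenStep []).map (fun c =>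
          (String.ofList [c],
           ((PySem.List.enumerate (cs.map PySem.Chars.lowerChar) 0).filter (fun p => p.2 == c)).map (·.1))) := by
  induction cs using List.reverseRecOn with
  | nil =>
      show (PySem.Dict.empty : PySem.Dict String (List Int)).items = _
      simp [PySem.List.enumerate_nil]
      rfl
  | append_singleton cs c ih =>
      set low := cs.map PySem.Chars.lowerChar with hlow
      set S := low.foldl seenStep [] with hS
      set lc := PySem.Chars.lowerChar c with hlcdef
      have hSnd : S.Nodup := nodup_foldl_seenStep low [] List.nodup_nil
      have hlow' : (cs ++ [c]).map PySem.Chars.lowerChar = low ++ [lc] := by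
        simp [hlow, hlcdef]
      have hseen' : ((cs ++ [c]).map PySem.Chars.lowerChar).foldl seenStep [] = seenStep S lc := by
        rw [hlow', List.foldl_append]; rfl
      have henum : PySem.List.enumerate (cs ++ [c]) 0
          = PySem.List.enumerate cs 0 ++ [((cs.length : Int), c)] := by
        rw [PySem.List.enumerate_append]
        simp [PySem.List.enumerate_cons, PySem.List.enumerate_nil]
      have henumL : PySem.List.enumerate (low ++ [lc]) 0
          = PySem.List.enumerate low 0 ++ [((low.length : Int), lc)] := by
        rw [PySem.List.enumerate_append]
        simp [PySem.List.enumerate_cons, PySem.List.enumerate_nil]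
      have hlen : (low.length : Int) = (cs.length : Int) := by simp [hlow]
      have hfold : (PySem.List.enumerate (cs ++ [c]) 0).foldl pvStep PySem.Dict.empty
          = pvStep ((PySem.List.enumerate cs 0).foldl pvStep PySem.Dict.empty)
              ((cs.length : Int), c) := by
        rw [henum, List.foldl_append]; rfl
      -- per-letter filter over the extended enumerate
      have hfilt : ∀ (x : Char),
          (PySem.List.enumerate (low ++ [lc]) 0).filter (fun p => p.2 == x)
            = (PySem.List.enumerate low 0).filter (fun p => p.2 == x)
              ++ (if lc = x then [((low.length : Int), lc)] else []) := by
        intro x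
        rw [henumL, List.filter_append]
        by_cases h : lc = x <;> simp [h]
      set P := (PySem.List.enumerate cs 0).foldl pvStep PySem.Dict.empty with hP
      have hkeys : P.keys = S.map (fun c => String.ofList [c]) := by
        have := congrArg (List.map Prod.fst) ih
        simpa [PySem.Dict.keys, List.map_map, Function.comp] using this
      have hkeysnd : P.keys.Nodup := by
        rw [hkeys]
        exact hSnd.map (fun a b h => stringify_inj a b h)
      rw [hseen', hfold, hlow']
      by_cases ha : PySem.Chars.isalpha lc
      · by_cases hmem : lc ∈ S
        · -- existing letter: replace its entry
          have hseenS : seenStep S lc = S := by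
            unfold seenStep
            simp [List.contains_eq_mem, hmem]
          rw [hseenS]
          set key := String.ofList [lc] with hkey
          set old := ((PySem.List.enumerate low 0).filter (fun p => p.2 == lc)).map (·.1) with hold
          have hItems : (key, old) ∈ P.items := by
            rw [ih]; exact List.mem_map.mpr ⟨lc, hmem, rfl⟩
          have hget : P.get? key = some old := PySem.Dict.get?_of_mem_items P hItems hkeysnd
          have hcont : P.contains key = true := by
            rw [PySem.Dict.contains_eq_isSome_get?, hget]; rfl
          have hstep : pvStep P ((cs.length : Int), c)
              = P.insert key (old ++ [(cs.length : Int)]) := by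
            simp only [pvStep, ← hlcdef, ← hkey, ha, if_true]
            show P.insert key (P.getD key [] ++ [(cs.length : Int)]) = _
            rw [PySem.Dict.getD_of_get?_eq_some P [] hget]
          rw [hstep, PySem.Dict.items_insert_of_contains P _ hcont, ih, List.map_map]
          apply List.map_congr_left
          intro x hx
          simp only [Function.comp]
          by_cases hxlc : x = lc
          · rw [hxlc, hfilt lc, if_pos rfl]
            have hbeq : (String.ofList [lc] == key) = true := by simp [hkey]
            simp [← hold, hlen, hkey]
          · have hne : (String.ofList [x] == key) = false := by
              rw [beq_eq_false_iff_ne]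
              exact fun h => hxlc (stringify_inj _ _ (h.trans hkey))
            have hneq : ¬ lc = x := fun h => hxlc h.symm
            rw [hfilt x, if_neg hneq, List.append_nil]
            simp [hne]
        · -- new letter: append a fresh entry
          have hseenS : seenStep S lc = S ++ [lc] := by
            unfold seenStep
            simp [List.contains_eq_mem, hmem, ha]
          rw [hseenS]
          set key := String.ofList [lc] with hkey
          have hnotk : key ∉ P.keys := by
            rw [hkeys]
            intro h
            rcases List.mem_map.mp h with ⟨y, hy, hyk⟩
            exact hmem ((stringify_inj y lc hyk) ▸ hy)
          have hcont : P.contains key = false := by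
            rw [PySem.Dict.contains_eq_decide_mem_keys]
            simpa using hnotk
          have hget : P.get? key = none := by
            rw [PySem.Dict.get?_eq_none_iff_not_mem_keys]
            exact hnotk
          have hstep : pvStep P ((cs.length : Int), c)
              = P.insert key [(cs.length : Int)] := by
            simp only [pvStep, ← hlcdef, ← hkey, ha, if_true]
            show P.insert key (P.getD key [] ++ [(cs.length : Int)]) = _
            rw [PySem.Dict.getD_of_get?_eq_none P [] hget]; rfl
          have hnotlow : lc ∉ low := by
            intro h
            exact hmem ((mem_foldl_seenStep low [] lc).mpr (Or.inr ⟨ha, h⟩))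
          rw [hstep, PySem.Dict.items_insert_of_not_contains P _ hcont, ih,
            List.map_append]
          congr 1
          · apply List.map_congr_left
            intro x hx
            have hxlc : ¬ lc = x := fun h => hmem (h ▸ hx)
            rw [hfilt x, if_neg hxlc, List.append_nil]
          · simp only [List.map_cons, List.map_nil]
            rw [hfilt lc, if_pos rfl, filter_enumerate_nil low lc hnotlow 0]
            simp [hlen, hkey]
      · -- non-alphabetic: nothing changes
        have hseenS : seenStep S lc = S := by
          unfold seenStep
          simp [ha]
        have hstep : pvStep P ((cs.length : Int), c) = P := by
          simp [pvStep, ← hlcdef, ha]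
        rw [hseenS, hstep, ih]
        apply List.map_congr_left
        intro x hx
        have hxa : PySem.Chars.isalpha x = true := alpha_of_mem_seen low x hx
        have hxlc : ¬ lc = x := fun h => ha (h ▸ hxa)
        rw [hfilt x, if_neg hxlc, List.append_nil]

-- ===== VERDICT (by name: the statement is the Claim_ definition above) =====
theorem parse_spec : Claim_equal_parse := by
  intro s _
  show parse s = parse_alt s
  unfold parse parse_alt
  have h := parse_loop s.toList 0 PySem.Dict.empty (by simp)
  simp only [show (PySem.Dict.empty : PySem.Dict String (List Int)).items = [] from rfl,
    List.map_nil, pvSumLen, List.sum_nil] at h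
  rw [show (PySem.Dict.mk ([] : List (String × Int))) = PySem.Dict.empty from rfl] at h
  rw [h]
  have hpi := posItems s.toList
  refine Prod.ext ?_ (Prod.ext ?_ ?_)
  · show ((PySem.List.enumerate s.toList 0).foldl pvStep PySem.Dict.empty).items.map pvLen = _
    rw [hpi, List.map_map]
    apply List.map_congr_left
    intro x hx
    simp only [Function.comp, pvLen]
    rw [List.length_map, filter_enumerate_length, PySem.List.count_eq]
  · exact hpi
  · show pvSumLen ((PySem.List.enumerate s.toList 0).foldl pvStep PySem.Dict.empty).items = _
    rw [pvSumLen, hpi, List.map_map]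
    show _ = (PySem.Dict.mk _).values.sum
    simp only [PySem.Dict.values, List.map_map]
    apply congrArg List.sum
    apply List.map_congr_left
    intro x hx
    simp only [Function.comp]
    rw [List.length_map, filter_enumerate_length, PySem.List.count_eq]
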